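-- pv_equiv track=rewrite | github.com/tae-hyunkim/personal_study | 코테공부/23년/Days61.py | solution
-- ===== SOURCE A (Python) =====
-- def solution(word):
--     answer = 0
--     lst = [781,156,31,6,1]
--     words = ['A','E','I','O','U']
--
--     for string in range(len(word)):
--         answer += (words.index(word[string])) * lst[string]
--
--     answer += len(word)
--     return answer
-- ===== SOURCE B (Python) =====
-- def solution(word):
--     # Pre-order DFS enumeration of all vowel strings of length <= 5;
--     # the answer is the position of `word` in that enumeration.
--     words_list = []
--
--     def dfs(prefix):
--         words_list.append(prefix)
--         if len(prefix) < 5: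
--             for v in "AEIOU":
--                 dfs(prefix + v)
--
--     dfs("")
--     return words_list.index(word)
-- ===== Notes on version B (the rewrite author's own statement) =====
-- stated objective: alternative
-- what changed: Replaces the positional-weight arithmetic (precomputed subtree sizes 781/156/31/6/1 multiplied by vowel indices) with a DFS that generates the full pre-order enumeration of vowel strings of length <= 5 and returns word's index in that list.
import Mathlib
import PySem

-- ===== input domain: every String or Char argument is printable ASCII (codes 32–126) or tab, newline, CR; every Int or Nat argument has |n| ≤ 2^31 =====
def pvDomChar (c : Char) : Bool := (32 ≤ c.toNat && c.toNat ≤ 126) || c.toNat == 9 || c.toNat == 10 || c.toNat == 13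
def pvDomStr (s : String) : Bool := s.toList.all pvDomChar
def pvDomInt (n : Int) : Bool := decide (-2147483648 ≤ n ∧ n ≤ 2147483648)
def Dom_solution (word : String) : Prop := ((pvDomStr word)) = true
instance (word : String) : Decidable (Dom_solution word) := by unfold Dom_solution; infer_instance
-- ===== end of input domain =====

-- B replaces A's positional-weight arithmetic by generating the pre-order DFS
-- enumeration of all vowel strings of length ≤ 5 and returning word's index in it
-- (objective: alternative algorithm, same result on Pre_).

-- ===== PORT A =====
-- literal transliteration of A: weights lst, vowel list words, loop over range(len(word))
def solution (word : String) : Int :=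
  let lst : List Int := [781, 156, 31, 6, 1]
  let words : List Char := ['A', 'E', 'I', 'O', 'U']
  let answer : Int :=
    (PySem.List.pyRange 0 (PySem.Str.len word) 1).foldl
      (fun answer i =>
        answer
          + (((PySem.List.index? words ((PySem.Str.pyGet? word i).getD ' ')).getD 0 : Nat) : Int)
            * ((PySem.List.pyGet? lst i).getD 0))
      0
  answer + PySem.Str.len word

-- ===== PORT B =====
def vowelsB : List Char := ['A', 'E', 'I', 'O', 'U']

-- dfs(prefix): collect prefix, then recurse on prefix+v for each vowel while len(prefix) < 5;
-- ported with fuel = 5 - len(prefix) (fuel 0 ↔ the Python guard len(prefix) < 5 fails);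
-- strings are represented by their code-point lists (exact on this domain).
def dfsB (pre : List Char) : Nat → List (List Char)
  | 0 => [pre]
  | f + 1 => pre :: vowelsB.flatMap (fun v => dfsB (pre ++ [v]) f)

-- words_list.index(word)
def solution_alt (word : String) : Int :=
  (((PySem.List.index? (dfsB [] 5) word.toList).getD 0 : Nat) : Int)

-- ===== PRECONDITION & SPEC =====
-- Pre_ excludes exactly the inputs where A raises: a non-vowel character
-- (ValueError from words.index) or length > 5 (IndexError from lst[string]).
def Pre_solution (word : String) : Prop :=
  word.toList.length ≤ 5
    ∧ word.toList.all (fun c => (['A', 'E', 'I', 'O', 'U'] : List Char).contains c) = true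
instance (word : String) : Decidable (Pre_solution word) := by unfold Pre_solution; infer_instance

def pvWitness_solution : String := "AE"

def Spec_solution (word : String) (out : Int) : Prop := out = solution_alt word
instance (word : String) (out : Int) : Decidable (Spec_solution word out) := by unfold Spec_solution; infer_instance

-- ===== CLAIM (what is proved, stated in full; the proofs are below) =====
def Claim_equal_solution : Prop :=
  ∀ (word : String), Dom_solution word → Pre_solution word → Spec_solution word (solution word)

-- ===== LEMMAS AND PROOFS =====

-- subtree size: number of enumerated strings below (and including) a node with
-- 5 - f characters still allowed; S 4 = 781, …, S 0 = 1 are exactly A's weights.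
def S : Nat → Nat
  | 0 => 1
  | f + 1 => 1 + 5 * S f

-- pre-order index of pre ++ l inside dfsB pre f
def idxF : List Char → Nat → Nat
  | [], _ => 0
  | _ :: _, 0 => 0
  | c :: rest, f + 1 => 1 + (PySem.List.index? vowelsB c).getD 0 * S f + idxF rest f

theorem length_dfsB (f : Nat) : ∀ pre, (dfsB pre f).length = S f := by
  induction f with
  | zero => intro pre; simp [dfsB, S]
  | succ f ih =>
      intro pre
      simp [dfsB, S, vowelsB, ih]
      omega

theorem prefix_dfsB (f : Nat) : ∀ pre e, e ∈ dfsB pre f → pre <+: e := by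
  induction f with
  | zero => intro pre e he; simp [dfsB] at he; simp [he]
  | succ f ih =>
      intro pre e he
      simp only [dfsB, List.mem_cons, List.mem_flatMap] at he
      rcases he with rfl | ⟨v, _, hv⟩
      · exact List.prefix_refl _
      · exact ((pre.prefix_append [v]).trans (ih _ _ hv))

theorem not_mem_dfsB_of_ne (f : Nat) (pre : List Char) {v c : Char} (rest : List Char)
    (h : v ≠ c) : pre ++ c :: rest ∉ dfsB (pre ++ [v]) f := by
  intro hm
  have hp := prefix_dfsB f _ _ hm
  have : [v] <+: c :: rest := by
    have := (List.prefix_append_right_inj (l₁ := [v]) (l₂ := c :: rest) pre).mp hp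
    exact this
  rcases this with ⟨t, ht⟩
  simp at ht
  exact h ht.1

theorem index?_append_of_not_mem {α : Type} [BEq α] [LawfulBEq α]
    (l : List α) (t : List α) (v : α) (h : v ∉ l) :
    PySem.List.index? (l ++ t) v = (PySem.List.index? t v).map (· + l.length) := by
  induction l with
  | nil => simp
  | cons x l ih =>
      have hx : x ≠ v := by intro hxv; exact h (by simp [hxv])
      have hv : v ∉ l := fun hm => h (by simp [hm])
      rw [List.cons_append, PySem.List.index?_cons_of_ne _ hx, ih hv]
      cases PySem.List.index? t v with
      | none => simp
      | some k => simp; omega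

-- position of pre ++ c :: rest inside the flattened children list
theorem index?_flatMap_dfsB (f : Nat) (pre : List Char) (c : Char) (rest : List Char) (m : Nat)
    (hidx : PySem.List.index? (dfsB (pre ++ [c]) f) (pre ++ c :: rest) = some m) :
    ∀ (vs : List Char), c ∈ vs → vs.Nodup →
      PySem.List.index? (vs.flatMap (fun v => dfsB (pre ++ [v]) f)) (pre ++ c :: rest)
        = some ((PySem.List.index? vs c).getD 0 * S f + m) := by
  intro vs
  induction vs with
  | nil => intro h; simp at h
  | cons v vs ih =>
      intro hmem hnd
      by_cases hvc : v = c
      · subst hvc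
        have hmem' : pre ++ v :: rest ∈ dfsB (pre ++ [v]) f := by
          have := (PySem.List.index?_isSome_iff (dfsB (pre ++ [v]) f) (pre ++ v :: rest)).mp
            (by rw [hidx]; rfl)
          exact this
        rw [List.flatMap_cons, PySem.List.index?_append_of_mem _ hmem', hidx,
          PySem.List.index?_cons_self]
        simp
      · have hc : c ∈ vs := by
          rcases List.mem_cons.mp hmem with h | h
          · exact absurd h.symm hvc
          · exact h
        have hnm : pre ++ c :: rest ∉ dfsB (pre ++ [v]) f :=
          not_mem_dfsB_of_ne f pre rest hvc
        rw [List.flatMap_cons,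
          index?_append_of_not_mem _ _ _ hnm,
          ih hc hnd.of_cons,
          PySem.List.index?_cons_of_ne _ (Ne.symm (fun h => hvc h.symm))]
        have hsome : (PySem.List.index? vs c).isSome = true :=
          (PySem.List.index?_isSome_iff vs c).mpr hc
        rcases Option.isSome_iff_exists.mp hsome with ⟨k, hk⟩
        have hk' : List.idxOf? c vs = some k := by
          rw [← PySem.List.index?_eq_idxOf?]; exact hk
        simp only [PySem.List.index?_eq_idxOf?, hk', Option.map_some, Option.getD_some,
          length_dfsB]
        ring

theorem index?_dfsB (l : List Char) : ∀ (f : Nat) (pre : List Char),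
    l.length ≤ f → (∀ c ∈ l, c ∈ vowelsB) →
    PySem.List.index? (dfsB pre f) (pre ++ l) = some (idxF l f) := by
  induction l with
  | nil =>
      intro f pre _ _
      cases f with
      | zero =>
          show PySem.List.index? [pre] (pre ++ []) = some (idxF [] 0)
          rw [List.append_nil]
          exact PySem.List.index?_cons_self pre []
      | succ f =>
          show PySem.List.index? (pre :: vowelsB.flatMap (fun v => dfsB (pre ++ [v]) f))
            (pre ++ []) = some (idxF [] (f + 1))
          rw [List.append_nil]
          exact PySem.List.index?_cons_self pre _
  | cons c rest ih =>
      intro f pre hlen hv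
      cases f with
      | zero => simp at hlen
      | succ f =>
          have hne : pre ≠ pre ++ c :: rest := by
            intro h
            have : pre.length = (pre ++ c :: rest).length := by rw [← h]
            simp at this
          have hidx : PySem.List.index? (dfsB (pre ++ [c]) f) ((pre ++ [c]) ++ rest)
              = some (idxF rest f) := by
            exact ih f (pre ++ [c]) (by simpa using Nat.lt_succ_iff.mp (by simpa using hlen))
              (fun d hd => hv d (by simp [hd]))
          have hidx' : PySem.List.index? (dfsB (pre ++ [c]) f) (pre ++ c :: rest)
              = some (idxF rest f) := by
            simpa using hidx
          have hvd : vowelsB.Nodup := by decide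
          have hcm : c ∈ vowelsB := hv c (by simp)
          rw [show dfsB pre (f + 1) = pre :: vowelsB.flatMap (fun v => dfsB (pre ++ [v]) f) from rfl,
            PySem.List.index?_cons_of_ne _ hne,
            index?_flatMap_dfsB f pre c rest (idxF rest f) hidx' vowelsB hcm hvd]
          simp [idxF]
          omega

-- B's value on Pre_
theorem alt_eq_idxF (word : String)
    (h1 : word.toList.length ≤ 5) (h2 : ∀ c ∈ word.toList, c ∈ vowelsB) :
    solution_alt word = (idxF word.toList 5 : Int) := by
  unfold solution_alt
  have h := index?_dfsB word.toList 5 [] h1 h2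
  rw [List.nil_append] at h
  rw [h]
  simp

-- A's loop as structural recursion over the remaining characters
def ALoop (lst : List Int) (full : List Char) : List Char → Int → Int → Int
  | [], _, acc => acc
  | _ :: rest, pos, acc =>
      ALoop lst full rest (pos + 1)
        (acc + (((PySem.List.index? vowelsB ((PySem.List.pyGet? full pos).getD ' ')).getD 0 : Nat) : Int)
          * ((PySem.List.pyGet? lst pos).getD 0))

theorem foldl_eq_ALoop (lst : List Int) (full : List Char) :
    ∀ (suf : List Char) (j : Nat), full.drop j = suf → ∀ (acc : Int),
    (PySem.List.pyRange (j : Int) (full.length : Int) 1).foldl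
      (fun a i =>
        a + (((PySem.List.index? vowelsB ((PySem.List.pyGet? full i).getD ' ')).getD 0 : Nat) : Int)
          * ((PySem.List.pyGet? lst i).getD 0)) acc
    = ALoop lst full suf (j : Int) acc := by
  intro suf
  induction suf with
  | nil =>
      intro j hj acc
      have hlen : full.length ≤ j := by
        by_contra h
        have := List.drop_eq_nil_iff.mp hj
        omega
      rw [PySem.List.pyRange_one_eq_nil (by exact_mod_cast hlen)]
      rfl
  | cons c rest ih =>
      intro j hj acc
      have hjl : j < full.length := by
        by_contra h
        rw [List.drop_eq_nil_iff.mpr (by omega)] at hj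
        simp at hj
      rw [PySem.List.pyRange_one_cons (by exact_mod_cast hjl), List.foldl_cons]
      have : full.drop (j + 1) = rest := by
        have := hj
        rw [List.drop_eq_getElem_cons hjl] at this
        injection this
      have h1 := ih (j + 1) this
        (acc + (((PySem.List.index? vowelsB ((PySem.List.pyGet? full (j : Int)).getD ' ')).getD 0 : Nat) : Int)
          * ((PySem.List.pyGet? lst (j : Int)).getD 0))
      push_cast at h1 ⊢
      rw [h1]
      rfl

-- the weights list holds the subtree sizes
def lstA : List Int := [781, 156, 31, 6, 1]

theorem lstA_pyGet (pos : Nat) (h : pos < 5) :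
    (PySem.List.pyGet? lstA (pos : Int)).getD 0 = (S (4 - pos) : Int) := by
  interval_cases pos <;> decide

theorem ALoop_eq_idxF (full : List Char) :
    ∀ (suf : List Char) (pos : Nat), full.drop pos = suf → suf.length + pos ≤ 5 →
    (∀ c ∈ suf, c ∈ vowelsB) → ∀ (acc : Int),
    ALoop lstA full suf (pos : Int) acc + suf.length = acc + idxF suf (5 - pos) := by
  intro suf
  induction suf with
  | nil => intro pos _ _ _ acc; simp [ALoop, idxF]
  | cons c rest ih =>
      intro pos hdrop hlen hv acc
      have hpos : pos < 5 := by simp at hlen; omega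
      have hposl : pos < full.length := by
        by_contra h
        rw [List.drop_eq_nil_iff.mpr (by omega)] at hdrop
        simp at hdrop
      have hget : (PySem.List.pyGet? full (pos : Int)).getD ' ' = c := by
        rw [PySem.List.pyGet?_natCast]
        rw [List.drop_eq_getElem_cons hposl] at hdrop
        have : full[pos] = c := by injection hdrop
        simp [List.getElem?_eq_getElem hposl, this]
      have hrest : full.drop (pos + 1) = rest := by
        rw [List.drop_eq_getElem_cons hposl] at hdrop
        injection hdrop
      have hf : 5 - pos = (4 - pos) + 1 := by omega
      show ALoop lstA full (c :: rest) (pos : Int) acc + ((c :: rest).length : Int)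
        = acc + idxF (c :: rest) (5 - pos)
      rw [hf]
      unfold ALoop
      rw [hget, lstA_pyGet pos hpos]
      have h1 := ih (pos + 1) hrest (by simp at hlen ⊢; omega)
        (fun d hd => hv d (by simp [hd]))
        (acc + (((PySem.List.index? vowelsB c).getD 0 : Nat) : Int) * (S (4 - pos) : Int))
      have hidxf : ((idxF (c :: rest) (4 - pos + 1) : Nat) : Int)
          = 1 + (((PySem.List.index? vowelsB c).getD 0 : Nat) : Int) * ((S (4 - pos) : Nat) : Int)
            + ((idxF rest (4 - pos) : Nat) : Int) := by
        simp only [idxF]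
        push_cast
        ring
      rw [show ((pos : Int) + 1) = (((pos + 1 : Nat) : Int)) from by push_cast; ring]
      simp only [List.length_cons, hidxf]
      push_cast at h1 ⊢
      linarith [h1]

-- ===== VERDICT (by name: the statement is the Claim_ definition above) =====
theorem solution_spec : Claim_equal_solution := by
  intro word _ hpre
  rcases hpre with ⟨h1, h2⟩
  have h2' : ∀ c ∈ word.toList, c ∈ vowelsB := by
    intro c hc
    have := List.all_eq_true.mp h2 c hc
    simpa [vowelsB] using this
  unfold Spec_solution
  rw [alt_eq_idxF word h1 h2']
  unfold solution
  have hlen : PySem.Str.len word = (word.toList.length : Int) := by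
    simp [PySem.Str.len_eq]
  have hbody : ∀ (a i : Int),
      a + (((PySem.List.index? (['A', 'E', 'I', 'O', 'U'] : List Char)
              ((PySem.Str.pyGet? word i).getD ' ')).getD 0 : Nat) : Int)
          * ((PySem.List.pyGet? ([781, 156, 31, 6, 1] : List Int) i).getD 0)
      = a + (((PySem.List.index? vowelsB ((PySem.List.pyGet? word.toList i).getD ' ')).getD 0 : Nat) : Int)
          * ((PySem.List.pyGet? lstA i).getD 0) := by
    intro a i
    have : PySem.Str.pyGet? word i = PySem.List.pyGet? word.toList i := by
      simp [PySem.Str.pyGet?_eq]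
    rw [this]
    rfl
  simp only [hlen]
  rw [show ((0 : Int) = ((0 : Nat) : Int)) from rfl]
  have hfun : (fun (answer i : Int) =>
        answer + (((PySem.List.index? (['A', 'E', 'I', 'O', 'U'] : List Char)
            ((PySem.Str.pyGet? word i).getD ' ')).getD 0 : Nat) : Int)
          * ((PySem.List.pyGet? ([781, 156, 31, 6, 1] : List Int) i).getD 0))
      = (fun (answer i : Int) =>
        answer + (((PySem.List.index? vowelsB ((PySem.List.pyGet? word.toList i).getD ' ')).getD 0 : Nat) : Int)
          * ((PySem.List.pyGet? lstA i).getD 0)) := by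
    funext a i
    exact hbody a i
  have hfold := foldl_eq_ALoop lstA word.toList word.toList 0 (by simp) 0
  calc (PySem.List.pyRange ((0 : Nat) : Int) (word.toList.length : Int) 1).foldl
        (fun answer i =>
          answer + (((PySem.List.index? (['A', 'E', 'I', 'O', 'U'] : List Char)
              ((PySem.Str.pyGet? word i).getD ' ')).getD 0 : Nat) : Int)
            * ((PySem.List.pyGet? ([781, 156, 31, 6, 1] : List Int) i).getD 0)) 0
        + (word.toList.length : Int)
      = (PySem.List.pyRange ((0 : Nat) : Int) (word.toList.length : Int) 1).foldl
        (fun answer i =>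
          answer + (((PySem.List.index? vowelsB ((PySem.List.pyGet? word.toList i).getD ' ')).getD 0 : Nat) : Int)
            * ((PySem.List.pyGet? lstA i).getD 0)) 0
        + (word.toList.length : Int) := by
          rw [hfun]
    _ = ALoop lstA word.toList word.toList ((0 : Nat) : Int) 0 + (word.toList.length : Int) := by
          rw [hfold]
    _ = (idxF word.toList 5 : Int) := by
          have h5 := ALoop_eq_idxF word.toList word.toList 0 (by simp) (by omega) h2' 0
          simp only [Nat.sub_zero, Nat.cast_zero] at h5 ⊢
          linarith [h5]
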